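-- pv_equiv track=rewrite | github.com/solar11781/gatino-rag | chunking/ts_chunker.py | _dedupe_and_reduce_spans
-- ===== SOURCE A (Python) =====
-- from typing import Dict, List, Optional, Set
--
-- def _dedupe_and_reduce_spans(spans: List[Dict[str, int]]) -> List[Dict[str, int]]:
--     if not spans:
--         return []
--
--     spans_sorted = sorted(spans, key=lambda s: (s["start"], -s["end"]))
--
--     # Remove exact duplicates
--     deduped: List[Dict[str, int]] = []
--     seen = set()
--     for sp in spans_sorted:
--         key = (sp["start"], sp["end"])
--         if key in seen:
--             continue
--         seen.add(key)
--         deduped.append(sp)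
--
--     # Drop fully-contained spans (keep outermost)
--     reduced: List[Dict[str, int]] = []
--     for sp in deduped:
--         if not reduced:
--             reduced.append(sp)
--             continue
--         last = reduced[-1]
--         # If sp is fully inside last, skip it
--         if sp["start"] >= last["start"] and sp["end"] <= last["end"]:
--             continue
--         reduced.append(sp)
--
--     return reduced
-- ===== SOURCE B (Python) =====
-- from typing import Dict, List
--
--
-- def _dedupe_and_reduce_spans(spans: List[Dict[str, int]]) -> List[Dict[str, int]]:
--     # One pass over the sorted spans keeping a running maximum end: since starts
--     # are non-decreasing after the sort, a span is fully contained in some kept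
--     # span exactly when its end does not exceed the maximum end seen so far
--     # (exact duplicates included), so no dedup set and no containment test on
--     # the last kept span are needed.
--     result: List[Dict[str, int]] = []
--     max_end = None
--     for sp in sorted(spans, key=lambda s: (s["start"], -s["end"])):
--         if max_end is None or max_end < sp["end"]:
--             result.append(sp)
--             max_end = sp["end"]
--     return result
-- ===== Notes on version B (the rewrite author's own statement) =====
-- stated objective: simpler
-- what changed: Replaces A's two passes (a seen-set dedup pass plus a containment-against-last pass) with a single running-maximum-end scan over the sorted spans: after sorting by (start, -end) a span is redundant exactly when its end does not exceed the maximum end seen so far, which subsumes both exact duplicates and containment.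
import Mathlib
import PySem

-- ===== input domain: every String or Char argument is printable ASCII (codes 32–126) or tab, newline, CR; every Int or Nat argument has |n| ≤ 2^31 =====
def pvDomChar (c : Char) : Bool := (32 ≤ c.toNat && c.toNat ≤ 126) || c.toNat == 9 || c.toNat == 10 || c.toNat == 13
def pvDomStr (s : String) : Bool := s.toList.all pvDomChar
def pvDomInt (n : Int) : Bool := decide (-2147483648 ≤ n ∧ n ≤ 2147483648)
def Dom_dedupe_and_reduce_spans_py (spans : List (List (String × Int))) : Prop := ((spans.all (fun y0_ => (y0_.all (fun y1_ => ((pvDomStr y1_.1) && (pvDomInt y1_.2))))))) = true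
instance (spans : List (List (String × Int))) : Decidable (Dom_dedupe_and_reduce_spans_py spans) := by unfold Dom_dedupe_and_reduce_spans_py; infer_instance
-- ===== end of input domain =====

-- B replaces A's two passes (seen-set dedup, then containment-against-last) with a single
-- running-maximum-end scan over the sorted spans; same return value on Pre_ (simpler, not faster).

-- ===== PORT A =====
-- sp[k] on a span dict: first matching key; total form with default 0 — exact under Pre_, which
-- guarantees the key is present (Python raises KeyError otherwise).
def pvLook (sp : List (String × Int)) (k : String) : Int :=
  (((sp.find? (fun p => p.1 == k)).map (fun p => p.2)).getD 0)

def pvKey1 (sp : List (String × Int)) : Int := pvLook sp "start"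
def pvKey2 (sp : List (String × Int)) : Int := -(pvLook sp "end")

def pvDedupStep (st : List (List (String × Int)) × PySem.Set (Int × Int)) (sp : List (String × Int)) :
    List (List (String × Int)) × PySem.Set (Int × Int) :=
  let key := (pvLook sp "start", pvLook sp "end")
  if PySem.Set.contains st.2 key then st
  else (st.1 ++ [sp], PySem.Set.add st.2 key)

def pvReduceStep (reduced : List (List (String × Int))) (sp : List (String × Int)) :
    List (List (String × Int)) :=
  match reduced.getLast? with
  | none => reduced ++ [sp]
  | some last =>
    if pvLook sp "start" ≥ pvLook last "start" ∧ pvLook sp "end" ≤ pvLook last "end" then reduced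
    else reduced ++ [sp]

def dedupe_and_reduce_spans_py (spans : List (List (String × Int))) : List (List (String × Int)) :=
  if spans = [] then []
  else
    let spans_sorted := PySem.List.sorted2 spans pvKey1 pvKey2
    let deduped := (spans_sorted.foldl pvDedupStep ([], PySem.Set.empty)).1
    deduped.foldl pvReduceStep []

-- ===== PORT B =====
def pvScanStep (st : List (List (String × Int)) × Option Int) (sp : List (String × Int)) :
    List (List (String × Int)) × Option Int :=
  match st.2 with
  | none => (st.1 ++ [sp], some (pvLook sp "end"))
  | some m => if m < pvLook sp "end" then (st.1 ++ [sp], some (pvLook sp "end")) else st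

def dedupe_and_reduce_spans_py_alt (spans : List (List (String × Int))) : List (List (String × Int)) :=
  ((PySem.List.sorted2 spans pvKey1 pvKey2).foldl pvScanStep ([], none)).1

-- ===== PRECONDITION & SPEC =====
-- Pre_ excludes spans missing a "start" or "end" key: there the Python A raises KeyError.
def Pre_dedupe_and_reduce_spans_py (spans : List (List (String × Int))) : Prop :=
  (spans.all (fun sp => sp.any (fun p => p.1 == "start") && sp.any (fun p => p.1 == "end"))) = true
instance (spans : List (List (String × Int))) : Decidable (Pre_dedupe_and_reduce_spans_py spans) := by
  unfold Pre_dedupe_and_reduce_spans_py; infer_instance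

def pvWitness_dedupe_and_reduce_spans_py : (List (List (String × Int))) :=
  [[("start", 0), ("end", 3)], [("start", 1), ("end", 2)]]

def Spec_dedupe_and_reduce_spans_py (spans : List (List (String × Int))) (out : List (List (String × Int))) : Prop := out = dedupe_and_reduce_spans_py_alt spans
instance (spans : List (List (String × Int))) (out : List (List (String × Int))) : Decidable (Spec_dedupe_and_reduce_spans_py spans out) := by unfold Spec_dedupe_and_reduce_spans_py; infer_instance

-- ===== CLAIM (what is proved, stated in full; the proofs are below) =====
def Claim_equal_dedupe_and_reduce_spans_py : Prop := ∀ (spans : List (List (String × Int))), Dom_dedupe_and_reduce_spans_py spans → Pre_dedupe_and_reduce_spans_py spans → Spec_dedupe_and_reduce_spans_py spans (dedupe_and_reduce_spans_py spans)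

-- ===== LEMMAS AND PROOFS =====

-- the lexicographic "before" test sorted2 uses
def pvLt {α : Type} (k1 k2 : α → Int) (a b : α) : Bool :=
  decide (k1 a < k1 b) || (!decide (k1 b < k1 a) && decide (k2 a < k2 b))

theorem sorted2_eq_foldl {α : Type} (xs : List α) (k1 k2 : α → Int) :
    PySem.List.sorted2 xs k1 k2 =
      xs.foldl (fun acc x => PySem.List.insertBy (pvLt k1 k2) x acc) [] := rfl

theorem pvLt_asymm {α : Type} (k1 k2 : α → Int) {a b : α} (h : pvLt k1 k2 a b = true) :
    pvLt k1 k2 b a = false := by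
  simp only [pvLt, Bool.or_eq_true, Bool.and_eq_true, Bool.not_eq_true', decide_eq_true_eq,
    decide_eq_false_iff_not] at h
  simp only [pvLt, Bool.or_eq_false_iff, Bool.and_eq_false_iff, Bool.not_eq_true,
    Bool.not_eq_false', decide_eq_false_iff_not, decide_eq_true_eq]
  omega

theorem pvLt_trans {α : Type} (k1 k2 : α → Int) {a b c : α}
    (h1 : pvLt k1 k2 a b = true) (h2 : pvLt k1 k2 b c = true) :
    pvLt k1 k2 a c = true := by
  simp only [pvLt, Bool.or_eq_true, Bool.and_eq_true, Bool.not_eq_true',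
    decide_eq_true_eq, decide_eq_false_iff_not] at *
  omega

theorem insertBy_pvLt_pairwise {α : Type} (k1 k2 : α → Int) (x : α) (ys : List α)
    (h : ys.Pairwise (fun a b => pvLt k1 k2 b a = false)) :
    (PySem.List.insertBy (pvLt k1 k2) x ys).Pairwise (fun a b => pvLt k1 k2 b a = false) := by
  induction ys with
  | nil => simp [PySem.List.insertBy]
  | cons y t ih =>
    rw [List.pairwise_cons] at h
    by_cases hxy : pvLt k1 k2 x y = true
    · simp only [PySem.List.insertBy, hxy, if_pos]
      refine List.Pairwise.cons ?_ (List.Pairwise.cons h.1 h.2)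
      intro z hz
      rcases List.mem_cons.mp hz with rfl | hz
      · exact pvLt_asymm k1 k2 hxy
      · by_contra hc
        have hzx : pvLt k1 k2 z x = true := by
          cases hzx : pvLt k1 k2 z x
          · exact absurd hzx hc
          · rfl
        have := pvLt_trans k1 k2 hzx hxy
        have := h.1 z hz
        simp_all
    · have hxy' : pvLt k1 k2 x y = false := by
        cases hv : pvLt k1 k2 x y
        · rfl
        · exact absurd hv hxy
      simp only [PySem.List.insertBy, hxy', Bool.false_eq_true, if_neg, if_false]
      refine List.Pairwise.cons ?_ (ih h.2)
      intro z hz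
      rw [PySem.List.mem_insertBy] at hz
      rcases hz with rfl | hz
      · exact hxy'
      · exact h.1 z hz

theorem foldl_insertBy_pvLt_pairwise {α : Type} (k1 k2 : α → Int) (l : List α) (acc : List α)
    (h : acc.Pairwise (fun a b => pvLt k1 k2 b a = false)) :
    (l.foldl (fun acc x => PySem.List.insertBy (pvLt k1 k2) x acc) acc).Pairwise
      (fun a b => pvLt k1 k2 b a = false) := by
  induction l generalizing acc with
  | nil => exact h
  | cons x t ih => exact ih _ (insertBy_pvLt_pairwise k1 k2 x acc h)

theorem sorted2_pairwise_k1 {α : Type} (xs : List α) (k1 k2 : α → Int) :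
    (PySem.List.sorted2 xs k1 k2).Pairwise (fun a b => k1 a ≤ k1 b) := by
  rw [sorted2_eq_foldl]
  refine (foldl_insertBy_pvLt_pairwise k1 k2 xs [] (by simp)).imp ?_
  intro a b hab
  simp only [pvLt, Bool.or_eq_false_iff, Bool.and_eq_false_iff, Bool.not_eq_false,
    decide_eq_false_iff_not, decide_eq_true_eq] at hab
  omega

-- clean recursive forms of the three loops
def pvDedup : List (List (String × Int)) → PySem.Set (Int × Int) → List (List (String × Int))
  | [], _ => []
  | sp :: t, seen =>
    if PySem.Set.contains seen (pvLook sp "start", pvLook sp "end") then pvDedup t seen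
    else sp :: pvDedup t (PySem.Set.add seen (pvLook sp "start", pvLook sp "end"))

def pvRed : List (List (String × Int)) → Option (List (String × Int)) → List (List (String × Int))
  | [], _ => []
  | sp :: t, none => sp :: pvRed t (some sp)
  | sp :: t, some L =>
    if pvLook sp "start" ≥ pvLook L "start" ∧ pvLook sp "end" ≤ pvLook L "end" then pvRed t (some L)
    else sp :: pvRed t (some sp)

def pvScan : List (List (String × Int)) → Option Int → List (List (String × Int))
  | [], _ => []
  | sp :: t, none => sp :: pvScan t (some (pvLook sp "end"))
  | sp :: t, some m =>
    if m < pvLook sp "end" then sp :: pvScan t (some (pvLook sp "end")) else pvScan t (some m)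

theorem foldl_dedupStep (l : List (List (String × Int)))
    (acc : List (List (String × Int))) (seen : PySem.Set (Int × Int)) :
    (l.foldl pvDedupStep (acc, seen)).1 = acc ++ pvDedup l seen := by
  induction l generalizing acc seen with
  | nil => simp [pvDedup]
  | cons sp t ih =>
    simp only [List.foldl_cons]
    by_cases hm : (pvLook sp "start", pvLook sp "end") ∈ seen
    · simp [pvDedupStep, pvDedup, hm, ih]
    · simp [pvDedupStep, pvDedup, hm, ih]

theorem foldl_reduceStep (l : List (List (String × Int))) (acc : List (List (String × Int))) :
    l.foldl pvReduceStep acc = acc ++ pvRed l acc.getLast? := by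
  induction l generalizing acc with
  | nil => simp [pvRed]
  | cons sp t ih =>
    rw [List.foldl_cons]
    cases hl : acc.getLast? with
    | none =>
      have hacc : acc = [] := List.getLast?_eq_none_iff.mp hl
      subst hacc
      have h1 : pvReduceStep [] sp = [sp] := rfl
      rw [h1, ih]
      simp [pvRed]
    | some L =>
      have hstep : pvReduceStep acc sp =
          if pvLook sp "start" ≥ pvLook L "start" ∧ pvLook sp "end" ≤ pvLook L "end" then acc
          else acc ++ [sp] := by
        unfold pvReduceStep; rw [hl]
      rw [hstep]
      simp only [pvRed]
      by_cases hcont : pvLook sp "start" ≥ pvLook L "start" ∧ pvLook sp "end" ≤ pvLook L "end"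
      · rw [if_pos hcont, if_pos hcont, ih, hl]
      · rw [if_neg hcont, if_neg hcont, ih, List.getLast?_concat]
        simp

theorem foldl_scanStep (l : List (List (String × Int)))
    (acc : List (List (String × Int))) (m : Option Int) :
    (l.foldl pvScanStep (acc, m)).1 = acc ++ pvScan l m := by
  induction l generalizing acc m with
  | nil => simp [pvScan]
  | cons sp t ih =>
    cases m with
    | none => simp [List.foldl_cons, pvScanStep, pvScan, ih]
    | some mv =>
      simp only [List.foldl_cons, pvScanStep, pvScan]
      by_cases hlt : mv < pvLook sp "end"
      · simp [hlt, ih]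
      · simp [hlt, ih]

-- the core equivalence on a start-sorted list
theorem red_dedup_eq_scan (l : List (List (String × Int))) (seen : PySem.Set (Int × Int))
    (L : List (String × Int))
    (hseen : ∀ p ∈ seen, p.2 ≤ pvLook L "end")
    (hstart : ∀ sp ∈ l, pvLook L "start" ≤ pvLook sp "start")
    (hpair : l.Pairwise (fun a b => pvLook a "start" ≤ pvLook b "start")) :
    pvRed (pvDedup l seen) (some L) = pvScan l (some (pvLook L "end")) := by
  induction l generalizing seen L with
  | nil => simp [pvDedup, pvRed, pvScan]
  | cons sp t ih =>
    rw [List.pairwise_cons] at hpair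
    simp only [pvDedup, pvScan]
    by_cases hm : (pvLook sp "start", pvLook sp "end") ∈ seen
    · have hle : pvLook sp "end" ≤ pvLook L "end" := hseen _ hm
      have hnl : ¬ (pvLook L "end" < pvLook sp "end") := by omega
      simp only [hm, if_pos, if_true, hnl, if_neg, if_false, PySem.Set.contains_eq_listContains,
        List.contains_eq_mem, decide_true, decide_false]
      exact ih seen L hseen (fun x hx => hstart x (List.mem_cons_of_mem _ hx)) hpair.2
    · simp only [hm, PySem.Set.contains_eq_listContains, List.contains_eq_mem, decide_false,
        Bool.false_eq_true, if_neg, if_false, pvRed]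
      by_cases hcont : pvLook sp "start" ≥ pvLook L "start" ∧ pvLook sp "end" ≤ pvLook L "end"
      · have hnl : ¬ (pvLook L "end" < pvLook sp "end") := by omega
        simp only [hcont, if_pos, if_true, hnl, if_neg, if_false]
        refine ih _ L ?_ (fun x hx => hstart x (List.mem_cons_of_mem _ hx)) hpair.2
        intro p hp
        rw [PySem.Set.mem_add] at hp
        rcases hp with hp | rfl
        · exact hseen p hp
        · exact hcont.2
      · have hge : pvLook L "start" ≤ pvLook sp "start" := hstart sp (List.mem_cons_self)
        have hlt : pvLook L "end" < pvLook sp "end" := by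
          rcases not_and_or.mp hcont with h | h
          · exact absurd hge h
          · omega
        simp only [hcont, if_neg, if_false, hlt, if_pos, if_true]
        refine congrArg (sp :: ·) (ih _ sp ?_ hpair.1 hpair.2)
        intro p hp
        rw [PySem.Set.mem_add] at hp
        rcases hp with hp | rfl
        · have := hseen p hp; omega
        · simp
  
theorem red_dedup_eq_scan_nil (l : List (List (String × Int)))
    (hpair : l.Pairwise (fun a b => pvLook a "start" ≤ pvLook b "start")) :
    pvRed (pvDedup l PySem.Set.empty) none = pvScan l none := by
  cases l with
  | nil => rfl
  | cons sp t =>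
    rw [List.pairwise_cons] at hpair
    simp only [pvDedup, pvScan, pvRed, PySem.Set.empty, PySem.Set.contains_eq_listContains,
      List.contains_eq_mem, List.not_mem_nil, decide_false, Bool.false_eq_true, if_false]
    refine congrArg (sp :: ·) (red_dedup_eq_scan t _ sp ?_ hpair.1 hpair.2)
    intro p hp
    have : p = (pvLook sp "start", pvLook sp "end") := by
      simpa [PySem.Set.empty, PySem.Set.add] using hp
    rw [this]

-- ===== VERDICT (by name: the statement is the Claim_ definition above) =====
theorem dedupe_and_reduce_spans_py_spec : Claim_equal_dedupe_and_reduce_spans_py := by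
  intro spans _ _
  unfold Spec_dedupe_and_reduce_spans_py dedupe_and_reduce_spans_py dedupe_and_reduce_spans_py_alt
  by_cases hsp : spans = []
  · subst hsp; rfl
  · simp only [hsp, if_neg, if_false]
    rw [foldl_dedupStep, List.nil_append, foldl_reduceStep, List.nil_append,
      foldl_scanStep, List.nil_append]
    have hpair := sorted2_pairwise_k1 spans pvKey1 pvKey2
    simp only [pvKey1] at hpair
    exact red_dedup_eq_scan_nil _ hpair
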